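-- pv_equiv track=rewrite | github.com/Mince64/Popfile-Modifier | misc.py | validateFileIndexes
-- ===== SOURCE A (Python) =====
-- import string
--
-- def validateFileIndexes(inp):
--     inp = ''.join([char for char in inp if char not in string.whitespace])
--     inp = inp.split(',')
--
--     for index in inp:
--         if not index.isdigit():
--             if '-' in index:
--                 i = index.find('-')
--                 if not index[:i].isdigit():
--                     return False
--                 if i == len(index) - 1:
--                     return False
--                 if not index[i+1:].isdigit():
--                     return False
--             else:
--                 return False
--
--     return True
-- ===== SOURCE B (Python) =====
-- import string
--
-- def validateFileIndexes(inp):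
--     # Single left-to-right scan with a 4-state machine:
--     # 0 = at token start (need a digit), 1 = in first number,
--     # 2 = just after '-' (need a digit), 3 = in second number.
--     state = 0
--     for char in inp:
--         if char in string.whitespace:
--             continue
--         if char.isdigit():
--             state = 1 if state <= 1 else 3
--         elif char == ',' and state in (1, 3):
--             state = 0
--         elif char == '-' and state == 1:
--             state = 2
--         else:
--             return False
--     return state in (1, 3)
-- ===== Notes on version B (the rewrite author's own statement) =====
-- stated objective: faster
-- what changed: Replaces A's whitespace-filtering pass, comma split, and per-token dash-search/slice checks with one left-to-right character scan driven by a 4-state machine (token start / first number / after dash / second number) that skips whitespace inline and allocates no intermediate strings or lists.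
import Mathlib
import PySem

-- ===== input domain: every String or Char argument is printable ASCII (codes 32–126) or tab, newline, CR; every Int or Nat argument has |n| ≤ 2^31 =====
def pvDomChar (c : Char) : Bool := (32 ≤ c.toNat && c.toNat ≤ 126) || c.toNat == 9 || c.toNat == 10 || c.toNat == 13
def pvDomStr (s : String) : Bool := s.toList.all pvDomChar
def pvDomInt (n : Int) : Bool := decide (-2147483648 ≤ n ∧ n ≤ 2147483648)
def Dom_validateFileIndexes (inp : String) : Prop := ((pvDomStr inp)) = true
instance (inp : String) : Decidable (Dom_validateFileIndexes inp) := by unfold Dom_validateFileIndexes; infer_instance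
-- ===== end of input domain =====

-- B replaces A's whitespace filter + comma split + per-token dash-search/slice checks by one
-- left-to-right 4-state character scan with no intermediate allocations (measured faster).

-- ===== PORT A =====
-- string.whitespace = ' \t\n\r\x0b\x0c' (the membership test `char in string.whitespace`)
def pvWs : List Char := [' ', '\t', '\n', '\r', Char.ofNat 11, Char.ofNat 12]

-- the body of A's per-token checks (the inside of A's for-loop)
def pvOkA (t : List Char) : Bool :=
  if PySem.Chars.strIsdigit t then true
  else if PySem.Chars.isIn ['-'] t then
    let i := PySem.Chars.find t ['-']
    if !PySem.Chars.strIsdigit (PySem.Chars.slice t none (some i)) then false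
    else if i == (t.length : Int) - 1 then false
    else if !PySem.Chars.strIsdigit (PySem.Chars.slice t (some (i + 1)) none) then false
    else true
  else false

-- A's for-loop with its early `return False`
def pvLoopA : List (List Char) → Bool
  | [] => true
  | t :: rest => if pvOkA t then pvLoopA rest else false

def validateFileIndexes (inp : String) : Bool :=
  let cleaned := inp.toList.filter (fun c => !(pvWs.contains c))
  let tokens := PySem.Chars.splitOn cleaned [',']
  pvLoopA tokens

-- ===== PORT B =====
-- the state machine loop of Source B (state 0/1/2/3, early `return False`)
def pvFsm (s : Nat) : List Char → Bool
  | [] => s == 1 || s == 3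
  | c :: rest =>
    if pvWs.contains c then pvFsm s rest
    else if PySem.Chars.isdigit c then pvFsm (if s ≤ 1 then 1 else 3) rest
    else if c == ',' && (s == 1 || s == 3) then pvFsm 0 rest
    else if c == '-' && s == 1 then pvFsm 2 rest
    else false

def validateFileIndexes_alt (inp : String) : Bool := pvFsm 0 inp.toList

-- ===== PRECONDITION & SPEC =====
def Spec_validateFileIndexes (inp : String) (out : Bool) : Prop := out = validateFileIndexes_alt inp
instance (inp : String) (out : Bool) : Decidable (Spec_validateFileIndexes inp out) := by unfold Spec_validateFileIndexes; infer_instance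

-- ===== CLAIM (what is proved, stated in full; the proofs are below) =====
def Claim_equal_validateFileIndexes : Prop := ∀ (inp : String), Dom_validateFileIndexes inp → Spec_validateFileIndexes inp (validateFileIndexes inp)

-- ===== LEMMAS AND PROOFS =====

-- one step of the state machine on a non-whitespace, non-comma character (none = reject)
def pvStep (s : Nat) (c : Char) : Option Nat :=
  if PySem.Chars.isdigit c then some (if s ≤ 1 then 1 else 3)
  else if c = '-' ∧ s = 1 then some 2
  else none

-- the state machine run over a (whitespace- and comma-free) token
def pvRun (s : Nat) : List Char → Option Nat
  | [] => some s
  | c :: rest =>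
    match pvStep s c with
    | some s' => pvRun s' rest
    | none => none

-- structural split-on-comma (proved equal to PySem.Chars.splitOn's fuel recursion)
def pvSplitAux : List Char → List Char → List (List Char)
  | [], cur => [cur.reverse]
  | c :: rest, cur => if c = ',' then cur.reverse :: pvSplitAux rest [] else pvSplitAux rest (c :: cur)

theorem pvRun_append (u v : List Char) (s : Nat) :
    pvRun s (u ++ v) = match pvRun s u with
      | some s' => pvRun s' v
      | none => none := by
  induction u generalizing s with
  | nil => simp [pvRun]
  | cons c r ih =>
    simp only [List.cons_append, pvRun]
    cases pvStep s c with
    | none => rfl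
    | some s' => exact ih s'

theorem pvRun_one_of_all (ds : List Char) (h : ds.all PySem.Chars.isdigit = true) :
    pvRun 1 ds = some 1 := by
  induction ds with
  | nil => rfl
  | cons c r ih =>
    simp only [List.all_cons, Bool.and_eq_true] at h
    simp [pvRun, pvStep, h.1, ih h.2]

theorem pvRun_three_of_all (ds : List Char) (h : ds.all PySem.Chars.isdigit = true) :
    pvRun 3 ds = some 3 := by
  induction ds with
  | nil => rfl
  | cons c r ih =>
    simp only [List.all_cons, Bool.and_eq_true] at h
    simp [pvRun, pvStep, h.1, ih h.2]

theorem pvRun_three_inv (r : List Char) (s' : Nat) (h : pvRun 3 r = some s') :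
    s' = 3 ∧ r.all PySem.Chars.isdigit = true := by
  induction r with
  | nil => simp [pvRun] at h; simp [h.symm]
  | cons c r ih =>
    simp only [pvRun, pvStep] at h
    by_cases hd : PySem.Chars.isdigit c = true
    · simp [hd] at h
      obtain ⟨h1, h2⟩ := ih h
      exact ⟨h1, by simp [hd, h2]⟩
    · simp [hd] at h

theorem pvRun_two_inv (b : List Char) (s' : Nat) (h : pvRun 2 b = some s') :
    (s' = 2 ∧ b = []) ∨ (s' = 3 ∧ PySem.Chars.strIsdigit b = true) := by
  cases b with
  | nil => simp [pvRun] at h; exact Or.inl ⟨h.symm, rfl⟩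
  | cons c r =>
    simp only [pvRun, pvStep] at h
    by_cases hd : PySem.Chars.isdigit c = true
    · simp [hd] at h
      obtain ⟨h1, h2⟩ := pvRun_three_inv r s' h
      exact Or.inr ⟨h1, by simp [PySem.Chars.strIsdigit, List.isEmpty, hd, h2]⟩
    · simp [hd] at h

theorem pvRun_one_inv (r : List Char) (s' : Nat) (h : pvRun 1 r = some s') :
    (s' = 1 ∧ r.all PySem.Chars.isdigit = true) ∨
    (s' = 2 ∧ ∃ a, r = a ++ ['-'] ∧ a.all PySem.Chars.isdigit = true) ∨
    (s' = 3 ∧ ∃ a b, r = a ++ '-' :: b ∧ a.all PySem.Chars.isdigit = true ∧ PySem.Chars.strIsdigit b = true) := by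
  induction r generalizing s' with
  | nil => simp [pvRun] at h; simp [h.symm]
  | cons c r ih =>
    simp only [pvRun, pvStep] at h
    by_cases hd : PySem.Chars.isdigit c = true
    · simp [hd] at h
      rcases ih s' h with ⟨h1, h2⟩ | ⟨h1, a, ha, h2⟩ | ⟨h1, a, b, ha, h2, h3⟩
      · exact Or.inl ⟨h1, by simp [hd, h2]⟩
      · exact Or.inr (Or.inl ⟨h1, c :: a, by simp [ha], by simp [hd, h2]⟩)
      · exact Or.inr (Or.inr ⟨h1, c :: a, b, by simp [ha], by simp [hd, h2], h3⟩)
    · by_cases hm : c = '-'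
      · simp [hd, hm] at h
        rcases pvRun_two_inv r s' h with ⟨h1, h2⟩ | ⟨h1, h2⟩
        · exact Or.inr (Or.inl ⟨h1, [], by simp [hm, h2], rfl⟩)
        · exact Or.inr (Or.inr ⟨h1, [], r, by simp [hm], rfl, h2⟩)
      · simp [hd, hm] at h

theorem pvRun_zero_inv (t : List Char) (s' : Nat) (h : pvRun 0 t = some s') :
    (s' = 0 ∧ t = []) ∨
    (s' = 1 ∧ PySem.Chars.strIsdigit t = true) ∨
    (s' = 2 ∧ ∃ a, t = a ++ ['-'] ∧ PySem.Chars.strIsdigit a = true) ∨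
    (s' = 3 ∧ ∃ a b, t = a ++ '-' :: b ∧ PySem.Chars.strIsdigit a = true ∧ PySem.Chars.strIsdigit b = true) := by
  cases t with
  | nil => simp [pvRun] at h; exact Or.inl ⟨h.symm, rfl⟩
  | cons c r =>
    simp only [pvRun, pvStep] at h
    by_cases hd : PySem.Chars.isdigit c = true
    · simp [hd] at h
      rcases pvRun_one_inv r s' h with ⟨h1, h2⟩ | ⟨h1, a, ha, h2⟩ | ⟨h1, a, b, ha, h2, h3⟩
      · exact Or.inr (Or.inl ⟨h1, by simp [PySem.Chars.strIsdigit, List.isEmpty, hd, h2]⟩)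
      · exact Or.inr (Or.inr (Or.inl ⟨h1, c :: a, by simp [ha],
          by simp [PySem.Chars.strIsdigit, List.isEmpty, hd, h2]⟩))
      · exact Or.inr (Or.inr (Or.inr ⟨h1, c :: a, b, by simp [ha],
          by simp [PySem.Chars.strIsdigit, List.isEmpty, hd, h2], h3⟩))
    · simp [hd] at h

theorem pvShape1 (t : List Char) (h : PySem.Chars.strIsdigit t = true) : pvRun 0 t = some 1 := by
  cases t with
  | nil => simp [PySem.Chars.strIsdigit] at h
  | cons c r =>
    unfold PySem.Chars.strIsdigit at h
    simp only [List.isEmpty_cons, Bool.not_false, Bool.true_and, List.all_cons,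
      Bool.and_eq_true] at h
    simp only [pvRun, pvStep, h.1, if_true]
    exact pvRun_one_of_all r (by simpa using h.2)

theorem pvShape3 (a b : List Char) (ha : PySem.Chars.strIsdigit a = true)
    (hb : PySem.Chars.strIsdigit b = true) : pvRun 0 (a ++ '-' :: b) = some 3 := by
  rw [pvRun_append, pvShape1 a ha]
  cases b with
  | nil => simp [PySem.Chars.strIsdigit] at hb
  | cons c r =>
    unfold PySem.Chars.strIsdigit at hb
    simp only [List.isEmpty_cons, Bool.not_false, Bool.true_and, List.all_cons,
      Bool.and_eq_true] at hb
    have hmd : PySem.Chars.isdigit '-' = false := by decide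
    simp [pvRun, pvStep, hmd, hb.1, pvRun_three_of_all r (by simpa using hb.2)]

-- the first '-' splits the token uniquely
theorem pvFirstSplit (a b a' b' : List Char) (h : a ++ '-' :: b = a' ++ '-' :: b')
    (ha : '-' ∉ a) (ha' : '-' ∉ a') : a = a' := by
  induction a generalizing a' with
  | nil =>
    cases a' with
    | nil => rfl
    | cons y ys =>
      simp only [List.nil_append, List.cons_append, List.cons.injEq] at h
      exact absurd (h.1 ▸ List.mem_cons_self) ha'
  | cons x xs ih =>
    cases a' with
    | nil =>
      simp only [List.nil_append, List.cons_append, List.cons.injEq] at h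
      exact absurd (h.1.symm ▸ List.mem_cons_self) ha
    | cons y ys =>
      simp only [List.cons_append, List.cons.injEq] at h
      rw [ih ys h.2 (fun hm => ha (List.mem_cons_of_mem _ hm))
        (fun hm => ha' (List.mem_cons_of_mem _ hm)), h.1]

-- a full token is accepted by A's checks iff the machine run from 0 ends in state 1 or 3
theorem pvTokEq (t : List Char) :
    pvOkA t = ((pvRun 0 t == some 1) || (pvRun 0 t == some 3)) := by
  by_cases hdig : PySem.Chars.strIsdigit t = true
  · rw [pvShape1 t hdig]; simp [pvOkA, hdig]
  · by_cases hin : PySem.Chars.isIn ['-'] t = true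
    · -- decompose t at the first '-'
      have hinf : ['-'] <:+: t := (PySem.Chars.isIn_iff_infix _ _).mp hin
      have hpos : 0 ≤ PySem.Chars.find t ['-'] := (PySem.Chars.find_nonneg_iff _ _).mpr hinf
      obtain ⟨hpre, hmin⟩ := PySem.Chars.find_spec hpos
      set n := (PySem.Chars.find t ['-']).toNat with hn
      obtain ⟨r, hr⟩ := hpre
      have hnlt : n < t.length := by
        by_contra hge
        rw [List.drop_eq_nil_of_le (by omega)] at hr
        exact absurd hr.symm (by simp)
      have hcd : t[n]'hnlt :: t.drop (n + 1) = t.drop n := List.getElem_cons_drop hnlt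
      have hcons : ('-' : Char) :: r = t[n]'hnlt :: t.drop (n + 1) := by
        rw [hcd, ← hr]; rfl
      have hhd : t[n]'hnlt = '-' := by
        injection hcons with h1 _; exact h1.symm
      have hsplit : t = t.take n ++ '-' :: t.drop (n + 1) := by
        conv_lhs => rw [← List.take_append_drop n t, ← hcd, hhd]
      have hna : '-' ∉ t.take n := by
        intro hm
        obtain ⟨j, hj, hgj⟩ := List.getElem_of_mem hm
        have hjm : j < min n t.length := by simpa [List.length_take] using hj
        have hjl : j < t.length := by omega
        have hjn : j < n := by omega
        have hgj' : t[j]'hjl = '-' := by rw [List.getElem_take] at hgj; exact hgj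
        refine hmin j hjn ⟨t.drop (j + 1), ?_⟩
        have hcdj : t[j]'hjl :: t.drop (j + 1) = t.drop j := List.getElem_cons_drop hjl
        rw [hgj'] at hcdj
        simpa using hcdj
      have hlen : t.length = n + 1 + (t.drop (n + 1)).length := by
        conv_lhs => rw [hsplit]
        simp [List.length_take]
        omega
      have hfind : PySem.Chars.find t ['-'] = (n : Int) := by omega
      -- evaluate A's slices
      have hsl1 : PySem.List.slice t none (some (PySem.Chars.find t ['-'])) = t.take n := by
        rw [hfind]
        simpa using PySem.List.slice_to t (b := (n : Int)) (by omega)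
      have hsl2 : PySem.List.slice t (some (PySem.Chars.find t ['-'] + 1)) none
          = t.drop (n + 1) := by
        rw [hfind]
        have := PySem.List.slice_from t (a := (n : Int) + 1) (by omega)
        simpa [show ((n : Int) + 1).toNat = n + 1 by omega] using this
      by_cases hA : PySem.Chars.strIsdigit (t.take n) = true
      · by_cases hB : PySem.Chars.strIsdigit (t.drop (n + 1)) = true
        · have hbne : t.drop (n + 1) ≠ [] := by
            intro h0; rw [h0] at hB; simp [PySem.Chars.strIsdigit] at hB
          have hrun : pvRun 0 t = some 3 := by
            conv_lhs => rw [hsplit]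
            exact pvShape3 _ _ hA hB
          have hlenne : (PySem.Chars.find t ['-'] == (t.length : Int) - 1) = false := by
            rw [hfind]
            have hne0 : (t.drop (n + 1)).length ≠ 0 := fun h0 =>
              hbne (List.eq_nil_of_length_eq_zero h0)
            simp only [beq_eq_false_iff_ne, ne_eq]
            omega
          simp [pvOkA, hdig, hin, hsl1, hsl2, hA, hB, hlenne, hrun]
        · have hrun23 : pvRun 0 t = pvRun 2 (t.drop (n + 1)) := by
            conv_lhs => rw [hsplit]
            rw [pvRun_append, pvShape1 _ hA]
            have hmd : PySem.Chars.isdigit '-' = false := by decide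
            simp [pvRun, pvStep, hmd]
          have hrhs : ((pvRun 0 t == some 1) || (pvRun 0 t == some 3)) = false := by
            rw [hrun23]
            cases hr2 : pvRun 2 (t.drop (n + 1)) with
            | none => simp
            | some s =>
              rcases pvRun_two_inv _ _ hr2 with ⟨h1, _⟩ | ⟨_, h2⟩
              · simp [h1]
              · exact absurd h2 hB
          rw [hrhs]
          by_cases hbnil : t.drop (n + 1) = []
          · have hlene : (PySem.Chars.find t ['-'] == (t.length : Int) - 1) = true := by
              rw [hfind]
              have h0 : (t.drop (n + 1)).length = 0 := by rw [hbnil]; rfl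
              simp only [beq_iff_eq]
              omega
            simp [pvOkA, hdig, hin, hsl1, hA, hlene]
          · simp [pvOkA, hdig, hin, hsl1, hsl2, hA, hB]
      · have hrhs : ((pvRun 0 t == some 1) || (pvRun 0 t == some 3)) = false := by
          cases hr0 : pvRun 0 t with
          | none => simp
          | some s =>
            rcases pvRun_zero_inv t s hr0 with ⟨h1, _⟩ | ⟨h1, h2⟩ | ⟨h1, _⟩ | ⟨h1, a', b', he, h2, h3⟩
            · simp [h1]
            · exact absurd h2 hdig
            · simp [h1]
            · exfalso
              have hna' : '-' ∉ a' := by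
                intro hm
                have := List.all_eq_true.mp ((Bool.and_eq_true _ _).mp h2).2 _ hm
                simp [PySem.Chars.isdigit] at this
              have : t.take n = a' := pvFirstSplit _ _ _ _ (hsplit.symm.trans he) hna hna'
              rw [this] at hA
              exact hA h2
        rw [hrhs]
        simp [pvOkA, hdig, hin, hsl1, hA]
    · -- no '-' in the token and not all digits: both sides reject
      have hrhs : ((pvRun 0 t == some 1) || (pvRun 0 t == some 3)) = false := by
        cases hr0 : pvRun 0 t with
        | none => simp
        | some s =>
          rcases pvRun_zero_inv t s hr0 with ⟨h1, _⟩ | ⟨h1, h2⟩ | ⟨h1, _⟩ | ⟨h1, a', b', he, _, _⟩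
          · simp [h1]
          · exact absurd h2 hdig
          · simp [h1]
          · exfalso
            have : ['-'] <:+: t := ⟨a', b', by simp [he]⟩
            exact absurd ((PySem.Chars.isIn_iff_infix _ _).mpr this) hin
      rw [hrhs]
      simp [pvOkA, hdig, hin]

-- if the current partial token is already rejected, A's loop rejects
theorem pvDeadToken (l cur : List Char) (h : pvRun 0 cur.reverse = none) :
    pvLoopA (pvSplitAux l cur) = false := by
  induction l generalizing cur with
  | nil => simp [pvSplitAux, pvLoopA, pvTokEq, h]
  | cons c rest ih =>
    by_cases hc : c = ','
    · simp [pvSplitAux, hc, pvLoopA, pvTokEq, h]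
    · simpa [pvSplitAux, hc] using ih (c :: cur)
        (by rw [List.reverse_cons, pvRun_append]; simp [h])

-- main invariant: the state machine from state s (= state of the current partial token)
-- agrees with A's per-token loop on the remaining input
theorem pvMain (l : List Char) (cur : List Char) (s : Nat)
    (hw : ∀ c ∈ l, pvWs.contains c = false)
    (hr : pvRun 0 cur.reverse = some s) :
    pvFsm s l = pvLoopA (pvSplitAux l cur) := by
  induction l generalizing cur s with
  | nil =>
    simp only [pvFsm, pvSplitAux, pvLoopA, pvTokEq, hr]
    by_cases h1 : s = 1 <;> by_cases h3 : s = 3 <;> simp [h1, h3]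
  | cons c rest ih =>
    have hwc : pvWs.contains c = false := hw c (by simp)
    have hw' : ∀ x ∈ rest, pvWs.contains x = false := fun x hx => hw x (by simp [hx])
    by_cases hd : PySem.Chars.isdigit c = true
    · have hc : ¬ c = ',' := by intro h; subst h; exact absurd hd (by decide)
      have hr' : pvRun 0 (c :: cur).reverse = some (if s ≤ 1 then 1 else 3) := by
        rw [List.reverse_cons, pvRun_append, hr]; simp [pvRun, pvStep, hd]
      simp only [pvFsm, hwc, Bool.false_eq_true, if_false, hd, if_true, pvSplitAux, hc]
      exact ih (c :: cur) _ hw' hr'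
    · by_cases hc : c = ','
      · subst hc
        by_cases hs : s = 1 ∨ s = 3
        · have hok : pvOkA cur.reverse = true := by
            rw [pvTokEq, hr]; rcases hs with h | h <;> simp [h]
          simp only [pvFsm, hwc, Bool.false_eq_true, if_false, hd, pvSplitAux, if_true,
            pvLoopA, hok]
          have hcond : ((',' == ',') && (s == 1 || s == 3)) = true := by
            rcases hs with h | h <;> simp [h]
          rw [if_pos hcond]
          exact ih [] 0 hw' rfl
        · push_neg at hs
          have hok : pvOkA cur.reverse = false := by
            rw [pvTokEq, hr]; simp [hs.1, hs.2]
          have hcond : ((',' == ',') && (s == 1 || s == 3)) = false := by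
            simp [hs.1, hs.2]
          have hcond3 : ((',' == '-') && (s == 1)) = false := by
            have h0 : (',' == '-') = false := by decide
            simp [h0]
          simp only [pvFsm, hwc, Bool.false_eq_true, if_false, hd, hcond, hcond3,
            pvSplitAux, if_true, pvLoopA, hok]
      · by_cases hds : c = '-' ∧ s = 1
        · have hr' : pvRun 0 (c :: cur).reverse = some 2 := by
            rw [List.reverse_cons, pvRun_append, hr]; simp [pvRun, pvStep, hds.1, hds.2, hd]; decide
          have hcond : ((c == ',') && (s == 1 || s == 3)) = false := by simp [hc]
          simp only [pvFsm, hwc, Bool.false_eq_true, if_false, hd, hcond, pvSplitAux, hc,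
            if_true]
          rw [if_pos (by simp [hds.1, hds.2])]
          exact ih (c :: cur) 2 hw' hr'
        · have hr' : pvRun 0 (c :: cur).reverse = none := by
            rw [List.reverse_cons, pvRun_append, hr]
            simp only [pvRun, pvStep, hd]
            simp [pvRun, hds]
          have hcond : ((c == ',') && (s == 1 || s == 3)) = false := by simp [hc]
          have hcond2 : ((c == '-') && (s == 1)) = false := by
            by_cases h1 : c = '-'
            · have : ¬ s = 1 := fun h => hds ⟨h1, h⟩
              simp [this]
            · simp [h1]
          simp only [pvFsm, hwc, Bool.false_eq_true, if_false, hd, hcond, hcond2,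
            pvSplitAux, hc, if_true]
          exact (pvDeadToken rest (c :: cur) hr').symm

-- PySem's fuel-based splitOn on a single-char ',' separator is the structural split
theorem pvGoNil (f : Nat) (cur : List Char) (acc : List (List Char)) :
    PySem.Chars.splitOn.go [','] (f + 1) [] cur acc = (cur.reverse :: acc).reverse := by
  rw [PySem.Chars.splitOn.go]
  exact fun h => by omega

theorem pvGoCons (f : Nat) (c : Char) (rest cur : List Char) (acc : List (List Char)) :
    PySem.Chars.splitOn.go [','] (f + 1) (c :: rest) cur acc =
      (if c = ',' then PySem.Chars.splitOn.go [','] f rest [] (cur.reverse :: acc)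
       else PySem.Chars.splitOn.go [','] f rest (c :: cur) acc) := by
  rw [PySem.Chars.splitOn.go]
  by_cases hc : c = ','
  · simp [hc, List.isPrefixOf]
  · simp [hc, List.isPrefixOf, Ne.symm hc]

theorem pvGoSpec (fuel : Nat) (l cur : List Char) (acc : List (List Char))
    (hf : l.length < fuel) :
    PySem.Chars.splitOn.go [','] fuel l cur acc = acc.reverse ++ pvSplitAux l cur := by
  induction l generalizing fuel cur acc with
  | nil =>
    cases fuel with
    | zero => omega
    | succ f => rw [pvGoNil]; simp [pvSplitAux]
  | cons c rest ih =>
    cases fuel with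
    | zero => omega
    | succ f =>
      rw [pvGoCons]
      simp only [List.length_cons] at hf
      by_cases hc : c = ','
      · simp only [hc, if_true]
        rw [ih f [] (cur.reverse :: acc) (by omega)]
        simp [pvSplitAux]
      · simp only [hc, if_false]
        rw [ih f (c :: cur) acc (by omega)]
        simp [pvSplitAux, hc]

-- B may skip whitespace inline: the run over the raw list equals the run over the filtered list
theorem pvFsmFilter (l : List Char) (s : Nat) :
    pvFsm s l = pvFsm s (l.filter (fun c => !(pvWs.contains c))) := by
  induction l generalizing s with
  | nil => rfl
  | cons c rest ih =>
    by_cases hw : pvWs.contains c = true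
    · have hm : c ∈ pvWs := by simpa using hw
      simp [pvFsm, List.filter_cons, hw, hm, ih]
    · simp only [Bool.not_eq_true] at hw
      have hm : c ∉ pvWs := by simpa using hw
      simp [pvFsm, List.filter_cons, hw, hm, ih]

-- ===== VERDICT (by name: the statement is the Claim_ definition above) =====
theorem validateFileIndexes_spec : Claim_equal_validateFileIndexes := by
  intro inp _
  show validateFileIndexes inp = validateFileIndexes_alt inp
  have h1 : validateFileIndexes inp = pvLoopA (PySem.Chars.splitOn.go [',']
      ((inp.toList.filter (fun c => !(pvWs.contains c))).length + 1)
      (inp.toList.filter (fun c => !(pvWs.contains c))) [] []) := rfl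
  have h2 : validateFileIndexes_alt inp
      = pvFsm 0 (inp.toList.filter (fun c => !(pvWs.contains c))) := pvFsmFilter _ 0
  rw [h1, h2, pvGoSpec _ _ _ _ (by omega), List.reverse_nil, List.nil_append]
  exact (pvMain _ [] 0 (fun c hc => by simpa using (List.of_mem_filter hc)) rfl).symm
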